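-- pv_equiv track=rewrite | github.com/whanyu1212/mental-gym | src/IT5001_final_prep/2324_sem1/marketing_promotion_optimized.py | get_total_prize_pool
-- ===== SOURCE A (Python) =====
-- import heapq
--
-- def get_total_prize_pool(input_lines):
--     min_heap = []
--     max_heap = []
--     prize_pool = 0
--
--     for line in input_lines:
--         daily_sales = list(map(int, line.strip().split()))
--         for sale in daily_sales:
--             # Insert sale into min-heap and max-heap
--             heapq.heappush(min_heap, sale)
--             heapq.heappush(max_heap, -sale)  # Max-heap implemented using negation
--
--         if min_heap and max_heap:
--             # Retrieve and remove the minimum sale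
--             min_sale = heapq.heappop(min_heap)
--             # Retrieve and remove the maximum sale
--             max_sale = -heapq.heappop(max_heap)
--             # Update the prize pool
--             prize_pool += max_sale - min_sale
--
--     return prize_pool
-- ===== SOURCE B (Python) =====
-- def _insert_sorted(lst, x):
--     i = 0
--     while i < len(lst) and lst[i] < x:
--         i += 1
--     lst.insert(i, x)
--
--
-- def _min_pop_sum(parsed):
--     pool = []
--     total = 0
--     for sales in parsed:
--         for s in sales:
--             _insert_sorted(pool, s)
--         if pool:
--             total += pool.pop(0)
--     return total
--
--
-- def get_total_prize_pool(input_lines):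
--     parsed = [[int(t) for t in line.strip().split()] for line in input_lines]
--     return -_min_pop_sum([[-s for s in sales] for sales in parsed]) - _min_pop_sum(parsed)
-- ===== Notes on version B (the rewrite author's own statement) =====
-- stated objective: alternative
-- what changed: A interleaves two binary heaps in one loop, popping the global min and max per line; B parses the lines once into a list and runs two independent accumulating sorted-list passes (a min pass and a negated min pass), summing the popped extremes separately and returning their difference.
import Mathlib
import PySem

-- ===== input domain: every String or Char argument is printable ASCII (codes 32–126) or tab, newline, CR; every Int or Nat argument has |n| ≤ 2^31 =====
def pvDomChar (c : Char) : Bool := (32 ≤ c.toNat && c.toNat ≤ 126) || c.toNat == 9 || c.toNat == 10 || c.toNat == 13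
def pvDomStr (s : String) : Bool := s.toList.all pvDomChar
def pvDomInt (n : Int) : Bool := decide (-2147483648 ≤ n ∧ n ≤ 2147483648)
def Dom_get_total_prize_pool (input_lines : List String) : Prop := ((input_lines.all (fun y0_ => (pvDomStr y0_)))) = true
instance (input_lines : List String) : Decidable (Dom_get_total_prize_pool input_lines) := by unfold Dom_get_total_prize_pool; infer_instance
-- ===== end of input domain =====

-- B replaces A's two accumulating binary heaps interleaved in one loop by two independent
-- sorted-list passes over the parsed lines (a min pass and a negated pass), summing the popped
-- extremes separately; same cost class, different decomposition (objective: alternative).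

-- ===== PORT A =====
-- heapq value model: a heap is the list of its elements; heappush appends, heappop removes and
-- returns the SMALLEST VALUE — exact for the values A reads off the heaps (the internal array
-- layout of heapq is not observed by A).
def heapPush (h : List Int) (x : Int) : List Int := h ++ [x]

def heapPopMin (h : List Int) : Int × List Int :=
  match PySem.List.min? h (fun x => x) with
  | some m => (m, h.erase m)
  | none => (0, h)   -- unreachable: A pops only from a non-empty heap

def stepA : List Int × List Int × Int → String → List Int × List Int × Int
  | (min_heap, max_heap, prize_pool), line =>
    let daily_sales := (PySem.Str.split₀ (PySem.Str.strip line)).map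
      (fun t => (PySem.Int.ofStr? t).getD 0)   -- Pre_ guarantees every token parses
    let hs := daily_sales.foldl
      (fun (p : List Int × List Int) sale => (heapPush p.1 sale, heapPush p.2 (-sale)))
      (min_heap, max_heap)
    if hs.1 ≠ [] ∧ hs.2 ≠ [] then
      let popMin := heapPopMin hs.1
      let popMax := heapPopMin hs.2
      (popMin.2, popMax.2, prize_pool + (-popMax.1 - popMin.1))
    else
      (hs.1, hs.2, prize_pool)

def get_total_prize_pool (input_lines : List String) : Int :=
  (input_lines.foldl stepA ([], [], 0)).2.2

-- ===== PORT B =====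
def parseLine (line : String) : List Int :=
  (PySem.Str.split₀ (PySem.Str.strip line)).map (fun t => (PySem.Int.ofStr? t).getD 0)

-- _insert_sorted: walk past the strictly smaller prefix, insert there
def insertSorted (lst : List Int) (x : Int) : List Int :=
  match lst with
  | [] => [x]
  | y :: ys => if y < x then y :: insertSorted ys x else x :: y :: ys

def stepB (st : List Int × Int) (sales : List Int) : List Int × Int :=
  let pool := sales.foldl insertSorted st.1
  match pool with
  | [] => ([], st.2)
  | m :: rest => (rest, st.2 + m)

def minPopSum (parsed : List (List Int)) : Int :=
  (parsed.foldl stepB ([], 0)).2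

def get_total_prize_pool_alt (input_lines : List String) : Int :=
  let parsed := input_lines.map parseLine;
  -(minPopSum (parsed.map (fun sales => sales.map (fun s => -s)))) - minPopSum parsed

-- ===== PRECONDITION & SPEC =====
-- Pre_ excludes exactly the inputs where Python's int() raises ValueError on a token.
def Pre_get_total_prize_pool (input_lines : List String) : Prop :=
  ∀ line ∈ input_lines, ∀ t ∈ PySem.Str.split₀ (PySem.Str.strip line),
    (PySem.Int.ofStr? t).isSome = true
instance (input_lines : List String) : Decidable (Pre_get_total_prize_pool input_lines) := by
  unfold Pre_get_total_prize_pool; infer_instance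

def pvWitness_get_total_prize_pool : List String := ["3 1 2", "", "5 -4"]

def Spec_get_total_prize_pool (input_lines : List String) (out : Int) : Prop := out = get_total_prize_pool_alt input_lines
instance (input_lines : List String) (out : Int) : Decidable (Spec_get_total_prize_pool input_lines out) := by unfold Spec_get_total_prize_pool; infer_instance

-- ===== CLAIM (what is proved, stated in full; the proofs are below) =====
def Claim_equal_get_total_prize_pool : Prop := ∀ (input_lines : List String), Dom_get_total_prize_pool input_lines → Pre_get_total_prize_pool input_lines → Spec_get_total_prize_pool input_lines (get_total_prize_pool input_lines)

-- ===== LEMMAS AND PROOFS =====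

lemma insertSorted_eq (l : List Int) (x : Int) :
    insertSorted l x = List.orderedInsert (· ≤ ·) x l := by
  induction l with
  | nil => rfl
  | cons y ys ih =>
    simp only [insertSorted, List.orderedInsert, ih]
    by_cases h : x ≤ y
    · rw [if_neg (by omega), if_pos h]
    · rw [if_pos (by omega), if_neg h]

lemma foldl_insertSorted_perm (sales : List Int) :
    ∀ p : List Int, (sales.foldl insertSorted p).Perm (p ++ sales) := by
  induction sales with
  | nil => intro p; simp
  | cons x xs ih =>
    intro p
    have h1 : (xs.foldl insertSorted (insertSorted p x)).Perm (insertSorted p x ++ xs) := ih _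
    have h2 : (insertSorted p x ++ xs).Perm ((x :: p) ++ xs) :=
      (insertSorted_eq p x ▸ List.perm_orderedInsert _ _ _).append_right xs
    exact (h1.trans h2).trans List.perm_middle.symm

lemma foldl_insertSorted_sorted (sales : List Int) :
    ∀ p : List Int, p.Pairwise (· ≤ ·) → (sales.foldl insertSorted p).Pairwise (· ≤ ·) := by
  induction sales with
  | nil => intro p hp; simpa using hp
  | cons x xs ih =>
    intro p hp
    exact ih _ (insertSorted_eq p x ▸ List.Pairwise.orderedInsert x p hp)

lemma foldB_shift (ls : List (List Int)) :
    ∀ (p : List Int) (s : Int),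
      (ls.foldl stepB (p, s)).1 = (ls.foldl stepB (p, 0)).1 ∧
      (ls.foldl stepB (p, s)).2 = s + (ls.foldl stepB (p, 0)).2 := by
  induction ls with
  | nil => intro p s; simp
  | cons x xs ih =>
    intro p s
    simp only [List.foldl_cons, stepB]
    cases h : x.foldl insertSorted p with
    | nil => simpa using ih [] s
    | cons m rest =>
      obtain ⟨h1, h2⟩ := ih rest (s + m)
      obtain ⟨h1', h2'⟩ := ih rest (0 + m)
      exact ⟨h1.trans h1'.symm, by rw [h2, h2']; ring⟩

lemma min?_of_perm_sorted (l : List Int) (m : Int) (rest : List Int)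
    (hp : l.Perm (m :: rest)) (hs : (m :: rest).Pairwise (· ≤ ·)) :
    PySem.List.min? l (fun x => x) = some m := by
  have hne : l ≠ [] := by
    intro h; subst h; exact (List.cons_ne_nil m rest) hp.symm.eq_nil
  cases hv : PySem.List.min? l (fun x => x) with
  | none => exact absurd ((PySem.List.min?_eq_none_iff _ _).mp hv) hne
  | some v =>
    have hvm : v ∈ l := PySem.List.min?_mem hv
    have hle : ∀ y ∈ l, v ≤ y := PySem.List.min?_isMin hv
    have hm : m ∈ l := hp.symm.subset (List.mem_cons_self ..)
    have h2 : m ≤ v := by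
      rcases List.mem_cons.mp (hp.subset hvm) with h | h
      · omega
      · exact (List.pairwise_cons.mp hs).1 v h
    simp [le_antisymm (hle m hm) h2]

lemma pushes_eq (daily : List Int) (mn mx : List Int) :
    daily.foldl (fun (p : List Int × List Int) sale => (heapPush p.1 sale, heapPush p.2 (-sale)))
      (mn, mx) = (mn ++ daily, mx ++ daily.map (fun s => -s)) := by
  rw [PySem.List.foldl_prod_mk (f := fun h s => heapPush h s) (g := fun h s => heapPush h (-s))]
  simp only [heapPush, Prod.mk.injEq]
  exact ⟨PySem.List.foldl_append_singleton_eq_self _ _,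
    PySem.List.foldl_append_singleton_eq_map _ _ _⟩

lemma mainA (lines : List String) :
    ∀ (mn mx p1 p2 : List Int) (pool : Int),
      mn.Perm p1 → p1.Pairwise (· ≤ ·) → mx.Perm p2 → p2.Pairwise (· ≤ ·) →
      p1.length = p2.length →
      (lines.foldl stepA (mn, mx, pool)).2.2
        = pool + (-((lines.map (fun l => (parseLine l).map (fun s => -s))).foldl stepB (p2, 0)).2
                 - ((lines.map parseLine).foldl stepB (p1, 0)).2) := by
  induction lines with
  | nil => intro mn mx p1 p2 pool _ _ _ _ _; simp
  | cons line rest ih =>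
    intro mn mx p1 p2 pool hp1 hs1 hp2 hs2 hlen
    simp only [List.foldl_cons, List.map_cons]
    rw [show stepA (mn, mx, pool) line
        = (if mn ++ parseLine line ≠ [] ∧ mx ++ (parseLine line).map (fun s => -s) ≠ [] then
            let popMin := heapPopMin (mn ++ parseLine line)
            let popMax := heapPopMin (mx ++ (parseLine line).map (fun s => -s))
            (popMin.2, popMax.2, pool + (-popMax.1 - popMin.1))
          else (mn ++ parseLine line, mx ++ (parseLine line).map (fun s => -s), pool)) from by
      simp only [stepA, parseLine, pushes_eq]]
    set daily := parseLine line with hdaily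
    have hperm1 : (mn ++ daily).Perm (daily.foldl insertSorted p1) :=
      (hp1.append_right daily).trans (foldl_insertSorted_perm daily p1).symm
    have hperm2 : (mx ++ daily.map (fun s => -s)).Perm
        ((daily.map (fun s => -s)).foldl insertSorted p2) :=
      (hp2.append_right _).trans (foldl_insertSorted_perm _ p2).symm
    have hsort1 : (daily.foldl insertSorted p1).Pairwise (· ≤ ·) :=
      foldl_insertSorted_sorted daily p1 hs1
    have hsort2 : ((daily.map (fun s => -s)).foldl insertSorted p2).Pairwise (· ≤ ·) :=
      foldl_insertSorted_sorted _ p2 hs2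
    have hlen12 : (daily.foldl insertSorted p1).length
        = ((daily.map (fun s => -s)).foldl insertSorted p2).length := by
      rw [(foldl_insertSorted_perm daily p1).length_eq,
          (foldl_insertSorted_perm (daily.map (fun s => -s)) p2).length_eq]
      simp [hlen]
    cases hc1 : daily.foldl insertSorted p1 with
    | nil =>
      have hc2 : (daily.map (fun s => -s)).foldl insertSorted p2 = [] := by
        rw [hc1] at hlen12; exact List.length_eq_zero_iff.mp hlen12.symm
      have hmn : mn ++ daily = [] := (hc1 ▸ hperm1).eq_nil
      have hmx : mx ++ daily.map (fun s => -s) = [] := (hc2 ▸ hperm2).eq_nil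
      rw [if_neg (by simp [hmn])]
      rw [show stepB (p1, 0) daily = ([], 0) from by simp [stepB, hc1]]
      rw [show stepB (p2, 0) (daily.map (fun s => -s)) = ([], 0) from by simp [stepB, hc2]]
      rw [hmn, hmx]
      exact ih [] [] [] [] pool (List.Perm.refl _) (by simp) (List.Perm.refl _) (by simp) rfl
    | cons m rest1 =>
      cases hc2 : (daily.map (fun s => -s)).foldl insertSorted p2 with
      | nil => rw [hc1, hc2] at hlen12; simp at hlen12
      | cons q rest2 =>
        have hmn : mn ++ daily ≠ [] := by
          intro h; rw [h] at hperm1; rw [hc1] at hperm1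
          exact (List.cons_ne_nil m rest1) hperm1.symm.eq_nil
        have hmx : mx ++ daily.map (fun s => -s) ≠ [] := by
          intro h; rw [h] at hperm2; rw [hc2] at hperm2
          exact (List.cons_ne_nil q rest2) hperm2.symm.eq_nil
        rw [if_pos ⟨hmn, hmx⟩]
        rw [show heapPopMin (mn ++ daily) = (m, (mn ++ daily).erase m) from by
          simp [heapPopMin, min?_of_perm_sorted _ m rest1 (hc1 ▸ hperm1) (hc1 ▸ hsort1)]]
        rw [show heapPopMin (mx ++ daily.map (fun s => -s))
            = (q, (mx ++ daily.map (fun s => -s)).erase q) from by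
          simp [heapPopMin, min?_of_perm_sorted _ q rest2 (hc2 ▸ hperm2) (hc2 ▸ hsort2)]]
        rw [show stepB (p1, 0) daily = (rest1, 0 + m) from by simp [stepB, hc1]]
        rw [show stepB (p2, 0) (daily.map (fun s => -s)) = (rest2, 0 + q) from by
          simp [stepB, hc2]]
        have he1 : ((mn ++ daily).erase m).Perm rest1 := by
          have := (hc1 ▸ hperm1).erase m
          rwa [List.erase_cons_head] at this
        have he2 : ((mx ++ daily.map (fun s => -s)).erase q).Perm rest2 := by
          have := (hc2 ▸ hperm2).erase q
          rwa [List.erase_cons_head] at this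
        have hr1 : rest1.Pairwise (· ≤ ·) := (List.pairwise_cons.mp (hc1 ▸ hsort1)).2
        have hr2 : rest2.Pairwise (· ≤ ·) := (List.pairwise_cons.mp (hc2 ▸ hsort2)).2
        have hrl : rest1.length = rest2.length := by
          rw [hc1, hc2] at hlen12; simpa using hlen12
        rw [ih _ _ rest1 rest2 _ he1 hr1 he2 hr2 hrl]
        obtain ⟨ha1, hb1⟩ := foldB_shift (rest.map parseLine) rest1 (0 + m)
        obtain ⟨ha2, hb2⟩ := foldB_shift
          (rest.map (fun l => (parseLine l).map (fun s => -s))) rest2 (0 + q)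
        rw [hb1, hb2]
        ring

-- ===== VERDICT (by name: the statement is the Claim_ definition above) =====
theorem get_total_prize_pool_spec : Claim_equal_get_total_prize_pool := by
  intro input_lines _ _
  unfold Spec_get_total_prize_pool get_total_prize_pool get_total_prize_pool_alt minPopSum
  rw [mainA input_lines [] [] [] [] 0 (List.Perm.refl _) (by simp) (List.Perm.refl _) (by simp) rfl]
  simp [List.map_map, Function.comp_def]
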